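-- pv_equiv track=rewrite | github.com/pedroandr3s/wifi | src/services.py | parse_iwlist_output
-- ===== SOURCE A (Python) =====
-- def parse_iwlist_output(output):
--     """Parsea la salida del comando iwlist para extraer información de redes."""
--     networks = []
--     network = {}
--     for line in output.split('\n'):
--         if "Cell" in line:
--             if network:
--                 networks.append(network)
--             network = {}
--             parts = line.split()
--             network["BSSID"] = parts[4]
--         elif "ESSID" in line:
--             network["SSID"] = line.split(":")[1].strip('"')
--         elif "Channel" in line:
--             network["Channel"] = line.split(":")[1]
--         elif "Quality" in line:
--             network["Quality"] = line.split("=")[1].split()[0]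
--         elif "Encryption key" in line:
--             network["Encryption"] = "on" if "on" in line else "off"
--     if network:
--         networks.append(network)
--     return networks
-- ===== SOURCE B (Python) =====
-- def _field(line):
--     """Recognise one field line; return a (key, value) pair or None."""
--     if "ESSID" in line:
--         return ("SSID", line.split(":")[1].strip('"'))
--     if "Channel" in line:
--         return ("Channel", line.split(":")[1])
--     if "Quality" in line:
--         return ("Quality", line.split("=")[1].split()[0])
--     if "Encryption key" in line:
--         return ("Encryption", "on" if "on" in line else "off")
--     return None
--
--
-- def _parse_group(lines):
--     """Parse one Cell-delimited group of lines into a network dict."""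
--     network = {}
--     for line in lines:
--         if "Cell" in line:
--             network = {"BSSID": line.split()[4]}
--         else:
--             kv = _field(line)
--             if kv is not None:
--                 network[kv[0]] = kv[1]
--     return network
--
--
-- def parse_iwlist_output(output):
--     """Parsea la salida del comando iwlist para extraer información de redes."""
--     # Phase 1: split the lines into groups, a new group at every 'Cell' line;
--     # the (possibly empty) leading group holds any lines before the first Cell.
--     groups = []
--     current = []
--     for line in output.split('\n'):
--         if "Cell" in line:
--             groups.append(current)
--             current = [line]
--         else:
--             current.append(line)
--     groups.append(current)
--     # Phase 2: parse each group independently, keep the non-empty results.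
--     networks = []
--     for g in groups:
--         network = _parse_group(g)
--         if network:
--             networks.append(network)
--     return networks
-- ===== Notes on version B (the rewrite author's own statement) =====
-- stated objective: alternative
-- what changed: A's single-pass state machine that flushes a pending dict at each 'Cell' line is replaced by a two-phase decomposition: first split the lines into Cell-delimited groups (with a leading pre-Cell group), then parse each group independently with a helper and keep the non-empty results.
import Mathlib
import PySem

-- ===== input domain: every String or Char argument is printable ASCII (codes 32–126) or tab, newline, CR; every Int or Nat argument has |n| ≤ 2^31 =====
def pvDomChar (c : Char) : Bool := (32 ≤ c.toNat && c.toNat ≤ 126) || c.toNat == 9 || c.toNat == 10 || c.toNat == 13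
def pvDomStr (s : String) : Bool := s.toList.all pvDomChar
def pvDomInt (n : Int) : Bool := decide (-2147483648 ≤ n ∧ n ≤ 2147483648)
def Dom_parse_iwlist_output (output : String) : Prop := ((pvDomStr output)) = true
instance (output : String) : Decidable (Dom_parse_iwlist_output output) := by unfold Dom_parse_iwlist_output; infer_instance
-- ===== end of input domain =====

-- B replaces A's flush-on-'Cell' state machine by splitting the lines into Cell-delimited
-- groups and parsing each group independently (alternative decomposition, same cost).

-- s.split(sep) for a non-empty literal sep: Str.split? is none only for sep = "", so the
-- default is never reached and this is exact.
def pvSplit (s sep : String) : List String := (PySem.Str.split? s sep).getD []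

-- ===== PORT A =====
-- loop body of A's single for-loop; state = (networks as item-lists, current dict)
def pvStepA (st : List (List (String × String)) × PySem.Dict String String) (line : String) :
    List (List (String × String)) × PySem.Dict String String :=
  if PySem.Str.isIn "Cell" line then
    ((if st.2.size ≠ 0 then st.1 ++ [st.2.items] else st.1),
     PySem.Dict.empty.insert "BSSID" ((PySem.List.pyGet? (PySem.Str.split₀ line) 4).getD ""))
    -- pyGet? is none (IndexError) only outside Pre_; the default is never reached inside Pre_
  else if PySem.Str.isIn "ESSID" line then
    (st.1, st.2.insert "SSID"
      (PySem.Str.stripChars ((PySem.List.pyGet? (pvSplit line ":") 1).getD "") "\""))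
  else if PySem.Str.isIn "Channel" line then
    (st.1, st.2.insert "Channel" ((PySem.List.pyGet? (pvSplit line ":") 1).getD ""))
  else if PySem.Str.isIn "Quality" line then
    (st.1, st.2.insert "Quality"
      ((PySem.List.pyGet? (PySem.Str.split₀
          ((PySem.List.pyGet? (pvSplit line "=") 1).getD "")) 0).getD ""))
  else if PySem.Str.isIn "Encryption key" line then
    (st.1, st.2.insert "Encryption" (if PySem.Str.isIn "on" line then "on" else "off"))
  else st

def parse_iwlist_output (output : String) : List (List (String × String)) :=
  let st := (pvSplit output "\n").foldl pvStepA ([], PySem.Dict.empty)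
  if st.2.size ≠ 0 then st.1 ++ [st.2.items] else st.1

-- ===== PORT B =====
-- B's _field helper: recognise one field line, as an optional (key, value) pair
def pvField (line : String) : Option (String × String) :=
  if PySem.Str.isIn "ESSID" line then
    some ("SSID", PySem.Str.stripChars ((PySem.List.pyGet? (pvSplit line ":") 1).getD "") "\"")
  else if PySem.Str.isIn "Channel" line then
    some ("Channel", (PySem.List.pyGet? (pvSplit line ":") 1).getD "")
  else if PySem.Str.isIn "Quality" line then
    some ("Quality", (PySem.List.pyGet? (PySem.Str.split₀
        ((PySem.List.pyGet? (pvSplit line "=") 1).getD "")) 0).getD "")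
  else if PySem.Str.isIn "Encryption key" line then
    some ("Encryption", if PySem.Str.isIn "on" line then "on" else "off")
  else none

-- loop body of B's _parse_group helper
def pvParseStep (net : PySem.Dict String String) (line : String) : PySem.Dict String String :=
  if PySem.Str.isIn "Cell" line then
    PySem.Dict.empty.insert "BSSID" ((PySem.List.pyGet? (PySem.Str.split₀ line) 4).getD "")
  else
    match pvField line with
    | some kv => net.insert kv.1 kv.2
    | none => net

def pvParseGroup (g : List String) : PySem.Dict String String :=
  g.foldl pvParseStep PySem.Dict.empty

-- phase-1 loop body: split at 'Cell' lines; state = (finished groups, current group)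
def pvStepG (st : List (List String) × List String) (line : String) :
    List (List String) × List String :=
  if PySem.Str.isIn "Cell" line then (st.1 ++ [st.2], [line]) else (st.1, st.2 ++ [line])

def parse_iwlist_output_alt (output : String) : List (List (String × String)) :=
  let gr := (pvSplit output "\n").foldl pvStepG ([], [])
  let groups := gr.1 ++ [gr.2]
  groups.foldl (fun acc g =>
    let net := pvParseGroup g
    if net.size ≠ 0 then acc ++ [net.items] else acc) []

-- ===== PRECONDITION & SPEC =====
-- Pre_ excludes exactly the inputs where A raises IndexError: a 'Cell' line with fewer than
-- 5 whitespace-separated parts, an ESSID/Channel line without ':', or a Quality line without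
-- '=' or whose piece after the first '=' has no whitespace-separated word.
def pvLineOK (line : String) : Bool :=
  if PySem.Str.isIn "Cell" line then decide (5 ≤ (PySem.Str.split₀ line).length)
  else if PySem.Str.isIn "ESSID" line then decide (2 ≤ (pvSplit line ":").length)
  else if PySem.Str.isIn "Channel" line then decide (2 ≤ (pvSplit line ":").length)
  else if PySem.Str.isIn "Quality" line then
    decide (2 ≤ (pvSplit line "=").length) &&
    decide (PySem.Str.split₀ ((PySem.List.pyGet? (pvSplit line "=") 1).getD "") ≠ [])
  else true

def Pre_parse_iwlist_output (output : String) : Prop :=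
  ((pvSplit output "\n").all pvLineOK) = true

instance (output : String) : Decidable (Pre_parse_iwlist_output output) := by
  unfold Pre_parse_iwlist_output; infer_instance

def pvWitness_parse_iwlist_output : String :=
  "Cell 01 - Address: AA:BB\n ESSID:\"home\"\n Channel:6\n Quality=70/70 Signal\n Encryption key:on"

def Spec_parse_iwlist_output (output : String) (out : List (List (String × String))) : Prop := out = parse_iwlist_output_alt output
instance (output : String) (out : List (List (String × String))) : Decidable (Spec_parse_iwlist_output output out) := by unfold Spec_parse_iwlist_output; infer_instance

-- ===== CLAIM (what is proved, stated in full; the proofs are below) =====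
def Claim_equal_parse_iwlist_output : Prop := ∀ (output : String), Dom_parse_iwlist_output output → Pre_parse_iwlist_output output → Spec_parse_iwlist_output output (parse_iwlist_output output)

-- ===== LEMMAS AND PROOFS =====

-- 'emit a group': what B contributes to the output for one group
def pvEmit (g : List String) : List (List (String × String)) :=
  if (pvParseGroup g).size ≠ 0 then [(pvParseGroup g).items] else []

-- finalize A's state
def pvFinal (st : List (List (String × String)) × PySem.Dict String String) :
    List (List (String × String)) :=
  if st.2.size ≠ 0 then st.1 ++ [st.2.items] else st.1

lemma pvFinal_append (a b : List (List (String × String))) (d : PySem.Dict String String) :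
    pvFinal (a ++ b, d) = a ++ pvFinal (b, d) := by
  unfold pvFinal; split_ifs <;> simp

lemma pvStepA_split (nets : List (List (String × String))) (net : PySem.Dict String String)
    (line : String) :
    pvStepA (nets, net) line =
      ((if PySem.Str.isIn "Cell" line ∧ net.size ≠ 0 then nets ++ [net.items] else nets),
       pvParseStep net line) := by
  unfold pvStepA pvParseStep pvField
  by_cases hc : PySem.Str.isIn "Cell" line = true
  · simp only [hc, if_true, true_and]
  · simp only [Bool.not_eq_true] at hc
    simp only [hc, Bool.false_eq_true, false_and, if_false]
    split_ifs <;> rfl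

lemma pvStepA_dist (nets : List (List (String × String))) (net : PySem.Dict String String)
    (line : String) :
    pvStepA (nets, net) line =
      (nets ++ (pvStepA ([], net) line).1, (pvStepA ([], net) line).2) := by
  rw [pvStepA_split nets net line, pvStepA_split [] net line]
  split_ifs <;> simp

lemma pvStepG_dist (gs : List (List String)) (cur : List String) (line : String) :
    pvStepG (gs, cur) line =
      (gs ++ (pvStepG ([], cur) line).1, (pvStepG ([], cur) line).2) := by
  unfold pvStepG; split_ifs <;> simp

lemma foldA_dist (ls : List String) :
    ∀ nets net, ls.foldl pvStepA (nets, net) =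
      (nets ++ (ls.foldl pvStepA ([], net)).1, (ls.foldl pvStepA ([], net)).2) := by
  induction ls with
  | nil => simp
  | cons l ls ih =>
    intro nets net
    simp only [List.foldl_cons]
    rcases hX : pvStepA ([], net) l with ⟨a, b⟩
    rw [pvStepA_dist nets net l, hX, ih (nets ++ a) b, ih a b]
    simp

lemma foldG_dist (ls : List String) :
    ∀ gs cur, ls.foldl pvStepG (gs, cur) =
      (gs ++ (ls.foldl pvStepG ([], cur)).1, (ls.foldl pvStepG ([], cur)).2) := by
  induction ls with
  | nil => simp
  | cons l ls ih =>
    intro gs cur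
    simp only [List.foldl_cons]
    rcases hX : pvStepG ([], cur) l with ⟨a, b⟩
    rw [pvStepG_dist gs cur l, hX, ih (gs ++ a) b, ih a b]
    simp

lemma pvParseGroup_snoc (cur : List String) (l : String) :
    pvParseGroup (cur ++ [l]) = pvParseStep (pvParseGroup cur) l := by
  simp [pvParseGroup, List.foldl_append]

lemma pvMain (ls : List String) :
    ∀ cur, pvFinal (ls.foldl pvStepA ([], pvParseGroup cur)) =
      ((ls.foldl pvStepG ([], cur)).1 ++ [(ls.foldl pvStepG ([], cur)).2]).flatMap pvEmit := by
  induction ls with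
  | nil =>
    intro cur
    simp [pvFinal, pvEmit]
  | cons l ls ih =>
    intro cur
    simp only [List.foldl_cons]
    by_cases hc : PySem.Str.isIn "Cell" l = true
    · have hstep : pvStepG ([], cur) l = ([cur], [l]) := by
        unfold pvStepG; rw [if_pos hc]; rfl
      have hcell : pvParseStep (pvParseGroup cur) l = pvParseGroup [l] := by
        simp only [pvParseGroup, List.foldl_cons, List.foldl_nil]
        unfold pvParseStep
        simp only [hc, if_true]
      have hA : pvStepA ([], pvParseGroup cur) l
          = (pvEmit cur, pvParseGroup [l]) := by
        rw [pvStepA_split [] (pvParseGroup cur) l, hcell]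
        unfold pvEmit
        simp only [hc, true_and, List.nil_append]
      rw [hA, hstep, foldA_dist ls (pvEmit cur) (pvParseGroup [l]),
          foldG_dist ls [cur] [l], pvFinal_append]
      rw [ih [l]]
      simp [List.flatMap_append]
    · have hc' : PySem.Str.isIn "Cell" l = false := by
        rw [Bool.not_eq_true] at hc; exact hc
      have hstep : pvStepG ([], cur) l = ([], cur ++ [l]) := by
        unfold pvStepG; rw [if_neg hc]
      have hA : pvStepA ([], pvParseGroup cur) l
          = ([], pvParseStep (pvParseGroup cur) l) := by
        rw [pvStepA_split [] (pvParseGroup cur) l]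
        simp only [hc', Bool.false_eq_true, false_and, if_false]
      rw [hA, hstep, ← pvParseGroup_snoc]
      exact ih (cur ++ [l])

-- B's second loop appends 'pvEmit g' for each group
lemma pvFlush_eq (groups : List (List String)) (acc : List (List (String × String))) :
    groups.foldl (fun acc g =>
        let net := pvParseGroup g
        if net.size ≠ 0 then acc ++ [net.items] else acc) acc = acc ++ groups.flatMap pvEmit := by
  induction groups generalizing acc with
  | nil => simp
  | cons g gs ih =>
    simp only [List.foldl_cons, List.flatMap_cons]
    rw [ih]
    unfold pvEmit
    split_ifs <;> simp

-- ===== VERDICT (by name: the statement is the Claim_ definition above) =====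
theorem parse_iwlist_output_spec : Claim_equal_parse_iwlist_output := by
  intro output _ _
  unfold Spec_parse_iwlist_output parse_iwlist_output parse_iwlist_output_alt
  rw [pvFlush_eq]
  have h := pvMain (pvSplit output "\n") []
  simpa [pvFinal, pvParseGroup] using h
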